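-- pv_equiv track=rewrite | github.com/7shi/multilingual-reader | experimental/sync_scores.py | extract_tables_from_scores
-- ===== SOURCE A (Python) =====
-- def extract_tables_from_scores(content: str) -> dict[str, list[str]]:
--     """
--     SCORES.mdから表を抽出し、ヘッダ行をキーとしてdictに格納する
--
--     キーが重複する場合は最初のものだけを保持する
--
--     Returns:
--         {ヘッダ行: [表の全行（ヘッダ、区切り、データ行）]}
--     """
--     lines = content.split('\n')
--     tables = {}
--     i = 0
--
--     while i < len(lines):
--         line = lines[i].strip()
--
--         # 表のヘッダ行を検出（| で始まる行）
--         if line.startswith('|'):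
--             header_line = line
--             table_lines = [header_line]
--             i += 1
--
--             # 表の残りの行を収集（| で始まる行が続く限り）
--             while i < len(lines):
--                 next_line = lines[i].strip()
--                 if next_line.startswith('|'):
--                     table_lines.append(next_line)
--                     i += 1
--                 elif next_line == '':
--                     # 空行は表の終わりの可能性があるが、次の行もチェック
--                     i += 1
--                     break
--                 else:
--                     # 表でない行が来たら表終了
--                     break
--
--             # ヘッダ行をキーとして表を保存（重複時は最初のものを保持）
--             if header_line not in tables:
--                 tables[header_line] = table_lines
--         else:
--             i += 1
--
--     return tables
-- ===== SOURCE B (Python) =====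
-- def extract_tables_from_scores(content: str) -> dict[str, list[str]]:
--     """Single forward pass with a run accumulator: consecutive pipe-prefixed lines form a
--     block; any other line flushes the current block into the dict (first header
--     wins)."""
--     tables = {}
--     block = []
--     for raw in content.split('\n'):
--         line = raw.strip()
--         if line.startswith('|'):
--             block.append(line)
--         elif block:
--             tables.setdefault(block[0], block)
--             block = []
--     if block:
--         tables.setdefault(block[0], block)
--     return tables
-- ===== Notes on version B (the rewrite author's own statement) =====
-- stated objective: simpler
-- what changed: Replaced the index-based outer/inner nested while-loop scan with a single forward fold that keeps the current run of pipe-prefixed lines as an accumulator and flushes it into the dict at each run end (and once after the loop).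
import Mathlib
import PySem

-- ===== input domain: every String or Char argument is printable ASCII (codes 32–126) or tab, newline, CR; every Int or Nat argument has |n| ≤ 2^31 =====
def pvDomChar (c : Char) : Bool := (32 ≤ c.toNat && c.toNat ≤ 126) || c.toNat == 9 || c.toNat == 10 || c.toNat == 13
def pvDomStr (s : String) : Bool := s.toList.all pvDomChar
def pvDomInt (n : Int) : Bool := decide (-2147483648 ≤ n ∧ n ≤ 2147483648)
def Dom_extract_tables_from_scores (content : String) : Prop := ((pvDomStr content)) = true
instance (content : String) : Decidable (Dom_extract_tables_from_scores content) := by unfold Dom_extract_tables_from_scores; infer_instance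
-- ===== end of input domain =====

-- B changes A's nested index-driven while loops into one fold with a run accumulator (simpler); same return value everywhere.

-- ===== PORT A =====
-- inner `while i < len(lines)` loop: collects stripped '|'-lines into table_lines,
-- returns (table_lines, remaining lines after the break / loop end)
def pvInnerA (rest : List String) (table_lines : List String) : List String × List String :=
  match rest with
  | [] => (table_lines, [])
  | l :: ls =>
    let next_line := PySem.Str.strip l
    if PySem.Str.startswith next_line "|" then pvInnerA ls (table_lines ++ [next_line])
    else if next_line == "" then (table_lines, ls)
    else (table_lines, l :: ls)

lemma pvInnerA_len (rest : List String) (tl : List String) :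
    (pvInnerA rest tl).2.length ≤ rest.length := by
  induction rest generalizing tl with
  | nil => simp [pvInnerA]
  | cons l ls ih =>
    simp only [pvInnerA]
    split
    · exact le_trans (ih _) (Nat.le_succ _)
    · split
      · simp
      · simp

-- outer `while i < len(lines)` loop
def pvOuterA (rest : List String) (tables : PySem.Dict String (List String)) :
    PySem.Dict String (List String) :=
  match rest with
  | [] => tables
  | l :: ls =>
    let line := PySem.Str.strip l
    if PySem.Str.startswith line "|" then
      let r := pvInnerA ls [line]
      pvOuterA r.2 (if tables.contains line then tables else tables.insert line r.1)
    else pvOuterA ls tables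
termination_by rest.length
decreasing_by
  · exact Nat.lt_succ_of_le (pvInnerA_len ls _)
  · exact Nat.lt_succ_self _

def extract_tables_from_scores (content : String) : List (String × List String) :=
  (pvOuterA ((PySem.Str.split? content "\n").getD []) PySem.Dict.empty).items

-- ===== PORT B =====
-- loop body of B's single `for raw in content.split('\n')`
def pvStepB (st : PySem.Dict String (List String) × List String) (raw : String) :
    PySem.Dict String (List String) × List String :=
  let line := PySem.Str.strip raw
  if PySem.Str.startswith line "|" then (st.1, st.2 ++ [line])
  else
    match st.2 with
    | [] => st
    | h :: _ => (st.1.setdefault h st.2, [])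

-- B's trailing `if block: tables.setdefault(block[0], block)`
def pvFlushB (st : PySem.Dict String (List String) × List String) :
    PySem.Dict String (List String) :=
  match st.2 with
  | [] => st.1
  | h :: _ => st.1.setdefault h st.2

def extract_tables_from_scores_alt (content : String) : List (String × List String) :=
  (pvFlushB (((PySem.Str.split? content "\n").getD []).foldl pvStepB (PySem.Dict.empty, []))).items

-- ===== PRECONDITION & SPEC =====
def Spec_extract_tables_from_scores (content : String) (out : List (String × List String)) : Prop := out = extract_tables_from_scores_alt content
instance (content : String) (out : List (String × List String)) : Decidable (Spec_extract_tables_from_scores content out) := by unfold Spec_extract_tables_from_scores; infer_instance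

-- ===== CLAIM (what is proved, stated in full; the proofs are below) =====
def Claim_equal_extract_tables_from_scores : Prop := ∀ (content : String), Dom_extract_tables_from_scores content → Spec_extract_tables_from_scores content (extract_tables_from_scores content)

-- ===== LEMMAS AND PROOFS =====

lemma setdefault_eq_if (d : PySem.Dict String (List String)) (k : String) (v : List String) :
    d.setdefault k v = if d.contains k then d else d.insert k v := by
  cases h : d.contains k with
  | true => rw [PySem.Dict.setdefault_of_contains d v h]; simp
  | false => rw [PySem.Dict.setdefault_of_not_contains d v h]; simp

-- joint invariant: B's fold with empty accumulator equals A's outer loop, and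
-- B's fold mid-block equals A's inner loop followed by the conditional insert.
lemma pv_key : ∀ n (lines : List String), lines.length ≤ n →
    (∀ tables, pvFlushB (lines.foldl pvStepB (tables, [])) = pvOuterA lines tables) ∧
    (∀ tables (h : String) (t : List String),
      pvFlushB (lines.foldl pvStepB (tables, h :: t)) =
        pvOuterA (pvInnerA lines (h :: t)).2
          (if tables.contains h then tables else tables.insert h (pvInnerA lines (h :: t)).1)) := by
  intro n
  induction n with
  | zero =>
    intro lines hlen
    have : lines = [] := List.eq_nil_of_length_eq_zero (Nat.le_zero.mp hlen)
    subst this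
    refine ⟨fun tables => by simp [pvFlushB, pvOuterA], fun tables h t => ?_⟩
    simp [pvInnerA, pvOuterA, pvFlushB, setdefault_eq_if]
  | succ n ih =>
    intro lines hlen
    cases lines with
    | nil =>
      refine ⟨fun tables => by simp [pvFlushB, pvOuterA], fun tables h t => ?_⟩
      simp [pvInnerA, pvOuterA, pvFlushB, setdefault_eq_if]
    | cons l ls =>
      have hls : ls.length ≤ n := Nat.lt_succ_iff.mp (by simpa using hlen)
      constructor
      · intro tables
        rw [List.foldl_cons, pvOuterA]
        by_cases hsw : PySem.Str.startswith (PySem.Str.strip l) "|" = true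
        · have hsw' : PySem.Chars.startswith (PySem.Chars.strip l.toList) ['|'] = true := by
            simpa using hsw
          have hstep : pvStepB (tables, []) l = (tables, [PySem.Str.strip l]) := by
            simp [pvStepB, hsw']
          rw [hstep, (ih ls hls).2 tables (PySem.Str.strip l) [], if_pos hsw]
        · have hsw'' : PySem.Chars.startswith (PySem.Chars.strip l.toList) ['|'] = false := by
            simpa using hsw
          have hstep : pvStepB (tables, []) l = (tables, []) := by
            simp [pvStepB, hsw'']
          rw [hstep, (ih ls hls).1 tables, if_neg hsw]
      · intro tables h t
        rw [List.foldl_cons]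
        by_cases hsw : PySem.Str.startswith (PySem.Str.strip l) "|" = true
        · have hsw' : PySem.Chars.startswith (PySem.Chars.strip l.toList) ['|'] = true := by
            simpa using hsw
          have hstep : pvStepB (tables, h :: t) l = (tables, h :: (t ++ [PySem.Str.strip l])) := by
            simp [pvStepB, hsw']
          have hinner : pvInnerA (l :: ls) (h :: t) = pvInnerA ls (h :: (t ++ [PySem.Str.strip l])) := by
            simp [pvInnerA, hsw']
          rw [hstep, (ih ls hls).2 tables h (t ++ [PySem.Str.strip l]), hinner]
        · have hsw'' : PySem.Chars.startswith (PySem.Chars.strip l.toList) ['|'] = false := by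
            simpa using hsw
          have hstep : pvStepB (tables, h :: t) l = (tables.setdefault h (h :: t), []) := by
            simp [pvStepB, hsw'']
          rw [hstep, (ih ls hls).1 (tables.setdefault h (h :: t)), setdefault_eq_if]
          by_cases he : PySem.Str.strip l = ""
          · have hinner : pvInnerA (l :: ls) (h :: t) = (h :: t, ls) := by
              simp only [pvInnerA, he]
              simp
              exact fun hc => absurd hc (by decide)
            rw [hinner]
          · have hinner : pvInnerA (l :: ls) (h :: t) = (h :: t, l :: ls) := by
              simp [pvInnerA, hsw'', he]
            rw [hinner, pvOuterA, if_neg hsw]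

-- ===== VERDICT (by name: the statement is the Claim_ definition above) =====
theorem extract_tables_from_scores_spec : Claim_equal_extract_tables_from_scores := by
  intro content _
  unfold Spec_extract_tables_from_scores extract_tables_from_scores extract_tables_from_scores_alt
  rw [(pv_key ((PySem.Str.split? content "\n").getD []).length ((PySem.Str.split? content "\n").getD []) le_rfl).1]
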